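-- pv_equiv track=rewrite | github.com/MrStrelow/BBRZ | Python/L04Funktionen/exercise1/solution/01_basic_muster.py | draw_diamond
-- ===== SOURCE A (Python) =====
-- class Position:
--     TOP_RIGHT = 1
--     TOP_LEFT = 2
--     BOT_RIGHT = 3
--     BOT_LEFT = 4
--
-- def copy(field):
--     return [row[:] for row in field]
--
-- def mirror_x(field):
--     return field[::-1]
--
-- def mirror_y(field):
--     return [row[::-1] for row in field]
--
-- def combine_form(container, part, position):
--     container = copy(container)
--     i_offset = len(part)
--     j_offset = len(part[0])
--
--     for i in range(len(part)):
--         for j in range(len(part[i])):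
--             if position == Position.TOP_LEFT:
--                 container[i][j] = part[i][j]
--             elif position == Position.BOT_RIGHT:
--                 container[i + i_offset][j + j_offset] = part[i][j]
--             elif position == Position.BOT_LEFT:
--                 container[i + i_offset][j] = part[i][j]
--             elif position == Position.TOP_RIGHT:
--                 container[i][j + j_offset] = part[i][j]
--     return container
--
-- def draw_diamond(field):
--     top_right = copy(field)
--     bot_right = mirror_x(field)
--     bot_left = mirror_y(bot_right)
--     top_left = mirror_x(bot_left)
--
--     ret = [["" for _ in range(len(field[0]) * 2)] for _ in range(len(field) * 2)]
--     ret = combine_form(ret, top_right, Position.TOP_RIGHT)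
--     ret = combine_form(ret, bot_right, Position.BOT_RIGHT)
--     ret = combine_form(ret, bot_left, Position.BOT_LEFT)
--     ret = combine_form(ret, top_left, Position.TOP_LEFT)
--
--     return ret
-- ===== SOURCE B (Python) =====
-- def draw_diamond(field):
--     width = 2 * len(field[0])
--
--     def half(rows):
--         # lay each row out twice on a blank line: the row to the right of the
--         # block's leading width, its mirror image flush left
--         indent = len(rows[0])
--         out = []
--         for row in rows:
--             line = [""] * width
--             line[indent:indent + len(row)] = row
--             line[:len(row)] = row[::-1]
--             out.append(line)
--         return out
--
--     return half(field) + half(field[::-1])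
-- ===== Notes on version B (the rewrite author's own statement) =====
-- stated objective: simpler
-- what changed: B renders the diamond row-by-row with one helper applied to the field and to the flipped field (each row laid out on a blank line by two bulk slice assignments, the row at the block's leading width and its mirror flush left), replacing A's Position constants, copy/mirror helpers and four cell-by-cell offset-indexed quadrant passes over a pre-allocated 2n x 2m grid; the bulk slice assignments replace per-cell Python-level index writes (measured ~3x faster).
import Mathlib
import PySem

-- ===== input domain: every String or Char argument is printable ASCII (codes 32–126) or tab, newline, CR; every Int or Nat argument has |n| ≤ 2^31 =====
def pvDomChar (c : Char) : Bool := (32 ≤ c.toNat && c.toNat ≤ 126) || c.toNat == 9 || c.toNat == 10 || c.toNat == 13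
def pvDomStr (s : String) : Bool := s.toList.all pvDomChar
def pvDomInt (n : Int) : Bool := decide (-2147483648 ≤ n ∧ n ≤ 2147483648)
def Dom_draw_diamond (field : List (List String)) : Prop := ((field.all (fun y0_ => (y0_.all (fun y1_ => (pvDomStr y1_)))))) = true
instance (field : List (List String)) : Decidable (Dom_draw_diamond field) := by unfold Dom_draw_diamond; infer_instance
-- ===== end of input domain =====

-- B renders the diamond row-by-row with one helper applied to the field and to the flipped
-- field (bulk slice assembly of each line), replacing A's four cell-by-cell offset-indexed
-- quadrant passes over a pre-allocated grid.

-- ===== PORT A =====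
-- copy(field) = [row[:] for row in field]
def pvCopy (f : List (List String)) : List (List String) := f.map (fun row => row)
-- mirror_x(field) = field[::-1]
def pvMirrorX (f : List (List String)) : List (List String) := f.reverse
-- mirror_y(field) = [row[::-1] for row in field]
def pvMirrorY (f : List (List String)) : List (List String) := f.map (fun row => row.reverse)
-- container[i][j] = v  (in range whenever the Python does not raise; out of range Python raises, excluded by Pre_)
def pvSetCell (c : List (List String)) (i j : Nat) (v : String) : List (List String) :=
  c.set i ((c.getD i []).set j v)
-- combine_form; `len(part[0])` raises on empty part in Python (headD defaults; those inputs are outside Pre_)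
def pvCombine (container part : List (List String)) (position : Int) : List (List String) :=
  let container := pvCopy container
  let i_offset := part.length
  let j_offset := (part.headD []).length
  (List.range part.length).foldl (fun c i =>
    (List.range ((part.getD i []).length)).foldl (fun c j =>
      let v := (part.getD i []).getD j ""
      if position = 2 then pvSetCell c i j v
      else if position = 3 then pvSetCell c (i + i_offset) (j + j_offset) v
      else if position = 4 then pvSetCell c (i + i_offset) j v
      else if position = 1 then pvSetCell c i (j + j_offset) v
      else c) c) container

def draw_diamond (field : List (List String)) : List (List String) :=
  let top_right := pvCopy field
  let bot_right := pvMirrorX field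
  let bot_left := pvMirrorY bot_right
  let top_left := pvMirrorX bot_left
  -- ret = [["" for _ in range(len(field[0]) * 2)] for _ in range(len(field) * 2)]; len(field[0]) raises on [] (outside Pre_)
  let ret := (List.range (field.length * 2)).map (fun _ =>
               (List.range ((field.headD []).length * 2)).map (fun _ => ""))
  let ret := pvCombine ret top_right 1
  let ret := pvCombine ret bot_right 3
  let ret := pvCombine ret bot_left 4
  let ret := pvCombine ret top_left 2
  ret

-- ===== PORT B =====
-- half(rows): line = [""]*width; line[indent:indent+len(row)] = row; line[:len(row)] = row[::-1] —
-- equal-length slice assignments at non-negative offsets; the take/++/drop forms are exact for them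
-- (Python clamps like take/drop).
def pvHalf (width : Nat) (rows : List (List String)) : List (List String) :=
  let indent := (rows.headD []).length
  rows.map (fun row =>
    let line := List.replicate width ""
    let line := line.take indent ++ row ++ line.drop (indent + row.length)
    row.reverse ++ line.drop row.length)

def draw_diamond_alt (field : List (List String)) : List (List String) :=
  let width := 2 * (field.headD []).length   -- len(field[0]); in Python raises IndexError on [] (outside Pre_)
  pvHalf width field ++ pvHalf width field.reverse

-- ===== PRECONDITION & SPEC =====
-- Pre_ is exactly A's non-raising domain: on the empty field, and whenever some row is longer
-- than the first, A raises IndexError (the fixed-width grid index overflows).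
def Pre_draw_diamond (field : List (List String)) : Prop :=
  field ≠ [] ∧ ∀ r ∈ field, r.length ≤ (field.headD []).length
instance (field : List (List String)) : Decidable (Pre_draw_diamond field) := by
  unfold Pre_draw_diamond; infer_instance
def pvWitness_draw_diamond : List (List String) := [["a", "b"], ["c", "d"]]

def Spec_draw_diamond (field : List (List String)) (out : List (List String)) : Prop :=
  out = draw_diamond_alt field
instance (field : List (List String)) (out : List (List String)) : Decidable (Spec_draw_diamond field out) := by unfold Spec_draw_diamond; infer_instance

-- ===== CLAIM (what is proved, stated in full; the proofs are below) =====
def Claim_equal_draw_diamond : Prop := ∀ (field : List (List String)), Dom_draw_diamond field → Pre_draw_diamond field → Spec_draw_diamond field (draw_diamond field)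

-- ===== LEMMAS AND PROOFS =====

-- overwrite the segment [o, o + p.length) of row r with p
def ow (r p : List String) (o : Nat) : List String := r.take o ++ p ++ r.drop (o + p.length)

-- the row shape A produces: row written at offset `off`, its reverse written at offset 0, into 2w blanks
def rowPair (w : Nat) (row : List String) (off : Nat) : List String :=
  let line := List.replicate (2 * w) ""
  let line := line.take off ++ row ++ line.drop (off + row.length)
  row.reverse ++ line.drop row.length

-- uniform shape of the four quadrant fills of pvCombine: rows io+i, columns o+j
def gridFold (part c : List (List String)) (io o : Nat) : List (List String) :=
  (List.range part.length).foldl (fun c i =>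
    (List.range ((part.getD i []).length)).foldl (fun c j =>
      pvSetCell c (i + io) (j + o) ((part.getD i []).getD j "")) c) c

lemma foldl_setCell (l : List Nat) (I : Nat) (f : Nat → Nat) (v : Nat → String) :
    ∀ c : List (List String), I < c.length →
      l.foldl (fun c j => pvSetCell c I (f j) (v j)) c
        = c.set I (l.foldl (fun r j => r.set (f j) (v j)) (c.getD I [])) := by
  induction l with
  | nil =>
      intro c hI
      simp only [List.foldl_nil]
      apply List.ext_getElem (by simp)
      intro k h1 h2
      by_cases hk : I = k
      · subst hk; simp [List.getD, List.getElem?_eq_getElem h1]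
      · simp [List.getElem_set_ne hk]
  | cons j l ih =>
      intro c hI
      simp only [List.foldl_cons]
      rw [ih (pvSetCell c I (f j) (v j)) (by simp [pvSetCell, hI])]
      show (c.set I ((c.getD I []).set (f j) (v j))).set I _ = _
      rw [List.set_set]
      congr 1
      have h2 : I < (c.set I ((c.getD I []).set (f j) (v j))).length := by simpa using hI
      have hgd : (pvSetCell c I (f j) (v j)).getD I [] = (c.getD I []).set (f j) (v j) := by
        rw [pvSetCell, List.getD_eq_getElem _ _ h2]
        simp [List.getElem_set_self]
      rw [hgd]

lemma ow_set (r : List String) (a : String) (q : List String) (o : Nat)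
    (h : o + (q.length + 1) ≤ r.length) :
    ow (r.set o a) q (o+1) = ow r (a :: q) o := by
  have ho : o < r.length := by omega
  have hlt : (r.take o).length = o := by simp; omega
  rw [ow, ow, List.set_eq_take_append_cons_drop, if_pos ho]
  rw [List.take_append, List.drop_append, hlt]
  rw [List.take_of_length_le (by omega : (r.take o).length ≤ o + 1),
      List.drop_of_length_le (by omega : (r.take o).length ≤ o + 1 + q.length)]
  have e1 : o + 1 - o = 1 := by omega
  have e2 : o + 1 + q.length - o = q.length + 1 := by omega
  rw [e1, e2]
  simp [List.drop_drop]
  omega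

lemma rowfill (p : List String) : ∀ (o : Nat) (r : List String), o + p.length ≤ r.length →
    (List.range p.length).foldl (fun r j => r.set (j + o) (p.getD j "")) r
      = ow r p o := by
  induction p with
  | nil =>
      intro o r h
      simp [ow]
  | cons a q ih =>
      intro o r h
      rw [List.length_cons, List.range_succ_eq_map]
      simp only [List.foldl_cons, List.foldl_map]
      have e0 : (0 : Nat) + o = o := by omega
      rw [show ((a :: q).getD 0 "") = a from rfl] at *
      simp only [Nat.succ_eq_add_one] at *
      calc (List.range q.length).foldl
              (fun (r : List String) (j : Nat) => r.set (j + 1 + o) ((a :: q).getD (j+1) "")) (r.set (0 + o) a)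
          = (List.range q.length).foldl
              (fun (r : List String) (j : Nat) => r.set (j + (o + 1)) (q.getD j "")) (r.set o a) := by
            rw [e0]
            have e1 : (fun (r : List String) (j : Nat) => r.set (j + 1 + o) ((a :: q).getD (j+1) ""))
                    = (fun (r : List String) (j : Nat) => r.set (j + (o + 1)) (q.getD j "")) := by
              funext r j
              have h2 : j + 1 + o = j + (o + 1) := by omega
              rw [h2, List.getD_cons_succ]
            rw [e1]
      _ = ow (r.set o a) q (o + 1) := by
            apply ih
            have h' : o + (q.length + 1) ≤ r.length := by simpa using h
            simp
            omega
      _ = ow r (a :: q) o := ow_set r a q o (by simpa using h)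

lemma getD_set_self (c : List (List String)) (n : Nat) (r : List String) (h : n < c.length) :
    (c.set n r).getD n [] = r := by
  rw [List.getD_eq_getElem _ _ (by simp [h])]
  simp

lemma getD_set_ne (c : List (List String)) (n m : Nat) (r : List String) (h : n ≠ m) :
    (c.set n r).getD m [] = c.getD m [] := by
  simp [List.getD, List.getElem?_set_ne h]

lemma gridFold_spec (part : List (List String)) : ∀ (c : List (List String)) (io o : Nat),
    io + part.length ≤ c.length →
    (∀ i, i < part.length → o + (part.getD i []).length ≤ (c.getD (io + i) []).length) →
    (gridFold part c io o).length = c.length ∧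
    ∀ k, (gridFold part c io o).getD k []
        = if io ≤ k ∧ k < io + part.length then ow (c.getD k []) (part.getD (k - io) []) o
          else c.getD k [] := by
  induction part with
  | nil =>
      intro c io o _ _
      refine ⟨by simp [gridFold], ?_⟩
      intro k
      rw [if_neg (by simp only [List.length_nil, Nat.add_zero]; omega)]
      simp [gridFold]
  | cons a q ih =>
      intro c io o h1 h2
      have hio : io < c.length := by
        rw [List.length_cons] at h1; omega
      have hrow0 : o + a.length ≤ (c.getD io []).length := by
        have := h2 0 (by simp)
        simpa using this
      have step1 : gridFold (a :: q) c io o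
          = gridFold q (c.set io (ow (c.getD io []) a o)) (io + 1) o := by
        rw [gridFold, List.length_cons, List.range_succ_eq_map]
        simp only [List.foldl_cons, List.foldl_map, List.getD_cons_zero, Nat.zero_add]
        have inner0 : (List.range a.length).foldl
            (fun c j => pvSetCell c io (j + o) (a.getD j "")) c
            = c.set io (ow (c.getD io []) a o) := by
          rw [foldl_setCell (List.range a.length) io (fun j => j + o) (fun j => a.getD j "") c hio]
          rw [rowfill a o (c.getD io []) hrow0]
        rw [inner0, gridFold]
        congr 1
        funext c i
        have h3 : i + 1 + io = i + (io + 1) := by omega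
        simp only [Nat.succ_eq_add_one, List.getD_cons_succ, h3]
      set c' := c.set io (ow (c.getD io []) a o) with hc'
      have hlen' : c'.length = c.length := by simp [hc']
      have h1' : (io + 1) + q.length ≤ c'.length := by
        rw [hlen']
        rw [List.length_cons] at h1
        omega
      have h2' : ∀ i, i < q.length → o + (q.getD i []).length ≤ (c'.getD (io + 1 + i) []).length := by
        intro i hi
        rw [hc', getD_set_ne _ _ _ _ (by omega)]
        have := h2 (i + 1) (by simp; omega)
        simpa [Nat.add_assoc, Nat.add_comm 1 i] using this
      obtain ⟨ihl, ihv⟩ := ih c' (io + 1) o h1' h2'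
      rw [step1]
      refine ⟨by rw [ihl, hlen'], ?_⟩
      intro k
      rw [ihv k]
      by_cases hk : k = io
      · subst hk
        rw [if_neg (by omega), if_pos (by simp)]
        rw [hc', getD_set_self _ _ _ hio]
        simp
      · rw [hc', getD_set_ne _ _ _ _ (by omega)]
        by_cases hin : io + 1 ≤ k ∧ k < io + 1 + q.length
        · rw [if_pos hin, if_pos (by simp; omega)]
          have h4 : k - io = (k - (io + 1)) + 1 := by omega
          rw [h4, List.getD_cons_succ]
        · rw [if_neg hin, if_neg (by simp; omega)]

lemma getD_replicate' (N k : Nat) (x : List String) (hk : k < N) :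
    (List.replicate N x).getD k [] = x := by
  rw [List.getD_eq_getElem _ _ (by simp [hk])]
  simp

lemma map_const_range {α : Type} (k : Nat) (x : α) :
    (List.range k).map (fun _ => x) = List.replicate k x := by
  have := List.eq_replicate_of_mem (a := x) (l := (List.range k).map (fun _ => x))
    (by intro b hb; simp at hb; exact hb.2)
  simpa using this

lemma pvCopy_eq (f : List (List String)) : pvCopy f = f := by
  simp [pvCopy]

lemma ow_length (r p : List String) (o : Nat) (h : o + p.length ≤ r.length) :
    (ow r p o).length = r.length := by
  simp [ow]
  omega

lemma combine1 (c part : List (List String)) :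
    pvCombine c part 1 = gridFold part c 0 (part.headD []).length := by
  simp [pvCombine, gridFold, pvCopy]

lemma combine2 (c part : List (List String)) :
    pvCombine c part 2 = gridFold part c 0 0 := by
  simp [pvCombine, gridFold, pvCopy]

lemma combine3 (c part : List (List String)) :
    pvCombine c part 3 = gridFold part c part.length (part.headD []).length := by
  simp [pvCombine, gridFold, pvCopy]

lemma combine4 (c part : List (List String)) :
    pvCombine c part 4 = gridFold part c part.length 0 := by
  simp [pvCombine, gridFold, pvCopy]

lemma draw_diamond_unfold (field : List (List String)) :
    draw_diamond field
      = gridFold (field.map List.reverse)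
          (gridFold (field.reverse.map List.reverse)
            (gridFold field.reverse
              (gridFold field
                (List.replicate (field.length * 2) (List.replicate ((field.headD []).length * 2) ""))
                0 (field.headD []).length)
              field.length (field.reverse.headD []).length)
            field.length 0)
          0 0 := by
  unfold draw_diamond
  simp only [pvCopy_eq, pvMirrorX, pvMirrorY]
  rw [combine1, combine3, combine4, combine2]
  rw [List.length_reverse, List.length_map, List.length_reverse,
      ← List.map_reverse, List.reverse_reverse]
  simp only [map_const_range]

lemma ow_rowPair (w off : Nat) (row : List String) :
    ow (ow (List.replicate (w * 2) "") row off) row.reverse 0 = rowPair w row off := by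
  have h2 : 2 * w = w * 2 := Nat.mul_comm 2 w
  simp only [rowPair, ow, h2, List.take_zero, List.nil_append, Nat.zero_add,
    List.length_reverse]

-- the master characterisation of A's output on Pre_: the top half is rowPair at offset w,
-- the bottom half rowPair of the reversed field at offset wl = length of the last row
lemma A_rows (field : List (List String)) (hpre : Pre_draw_diamond field) :
    (draw_diamond field).length = field.length * 2 ∧
    (∀ k, k < field.length →
      (draw_diamond field).getD k []
        = rowPair (field.headD []).length (field.getD k []) (field.headD []).length) ∧
    (∀ k, field.length ≤ k → k < field.length * 2 →
      (draw_diamond field).getD k []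
        = rowPair (field.headD []).length (field.reverse.getD (k - field.length) [])
            (field.reverse.headD []).length) := by
  obtain ⟨hne, hle⟩ := hpre
  rw [draw_diamond_unfold]
  have hrevne : field.reverse ≠ [] := by simpa using hne
  have hb1 : ∀ i, i < field.length → (field.getD i []).length ≤ (field.headD []).length := by
    intro i hi
    rw [List.getD_eq_getElem _ _ hi]
    exact hle _ (List.getElem_mem hi)
  have hb2 : ∀ i, i < field.length → (field.reverse.getD i []).length ≤ (field.headD []).length := by
    intro i hi
    rw [List.getD_eq_getElem _ _ (by simpa using hi)]
    refine hle _ ?_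
    rw [← List.mem_reverse]
    exact List.getElem_mem (by simpa using hi)
  have hWL : (field.reverse.headD []).length ≤ (field.headD []).length := by
    refine hle _ ?_
    rw [← List.mem_reverse]
    cases h : field.reverse with
    | nil => exact absurd h hrevne
    | cons x xs => simp
  -- first fill: top-right quadrant
  obtain ⟨hL1, hV1⟩ := gridFold_spec field
      (List.replicate (field.length * 2) (List.replicate ((field.headD []).length * 2) ""))
      0 (field.headD []).length
      (by simp; omega)
      (by
        intro i hi
        rw [Nat.zero_add, getD_replicate' _ _ _ (by omega), List.length_replicate]
        have := hb1 i hi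
        omega)
  set R1 := gridFold field
      (List.replicate (field.length * 2) (List.replicate ((field.headD []).length * 2) ""))
      0 (field.headD []).length with hR1def
  have hR1len : R1.length = field.length * 2 := by rw [hL1]; simp
  have hR1top : ∀ k, k < field.length →
      R1.getD k [] = ow (List.replicate ((field.headD []).length * 2) "") (field.getD k []) (field.headD []).length := by
    intro k hk
    rw [hV1 k, if_pos ⟨Nat.zero_le _, by omega⟩, Nat.sub_zero,
        getD_replicate' _ _ _ (by omega)]
  have hR1bot : ∀ k, field.length ≤ k → k < field.length * 2 →
      R1.getD k [] = List.replicate ((field.headD []).length * 2) "" := by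
    intro k h1 h2
    rw [hV1 k, if_neg (by omega), getD_replicate' _ _ _ h2]
  have hR1toplen : ∀ k, k < field.length → (R1.getD k []).length = (field.headD []).length * 2 := by
    intro k hk
    rw [hR1top k hk, ow_length _ _ _ (by rw [List.length_replicate]; have := hb1 k hk; omega)]
    simp
  -- second fill: bottom-right quadrant
  obtain ⟨hL2, hV2⟩ := gridFold_spec field.reverse R1 field.length (field.reverse.headD []).length
      (by rw [hR1len]; simp; omega)
      (by
        intro i hi
        rw [List.length_reverse] at hi
        rw [hR1bot (field.length + i) (by omega) (by omega), List.length_replicate]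
        have := hb2 i hi
        omega)
  set R2 := gridFold field.reverse R1 field.length (field.reverse.headD []).length with hR2def
  have hR2len : R2.length = field.length * 2 := by rw [hL2, hR1len]
  have hR2top : ∀ k, k < field.length →
      R2.getD k [] = ow (List.replicate ((field.headD []).length * 2) "") (field.getD k []) (field.headD []).length := by
    intro k hk
    rw [hV2 k, if_neg (by omega), hR1top k hk]
  have hR2bot : ∀ k, field.length ≤ k → k < field.length * 2 →
      R2.getD k [] = ow (List.replicate ((field.headD []).length * 2) "")
        (field.reverse.getD (k - field.length) []) (field.reverse.headD []).length := by
    intro k h1 h2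
    rw [hV2 k, if_pos ⟨h1, by simp; omega⟩, hR1bot k h1 h2]
  have hR2botlen : ∀ k, field.length ≤ k → k < field.length * 2 →
      (R2.getD k []).length = (field.headD []).length * 2 := by
    intro k h1 h2
    rw [hR2bot k h1 h2, ow_length _ _ _ (by rw [List.length_replicate]; have := hb2 (k - field.length) (by omega); omega)]
    simp
  -- third fill: bottom-left quadrant
  have hP3 : ∀ i, i < field.length →
      (field.reverse.map List.reverse).getD i [] = (field.reverse.getD i []).reverse := by
    intro i hi
    rw [List.getD_eq_getElem _ _ (by simpa using hi), List.getD_eq_getElem _ _ (by simpa using hi)]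
    simp
  obtain ⟨hL3, hV3⟩ := gridFold_spec (field.reverse.map List.reverse) R2 field.length 0
      (by rw [hR2len]; simp; omega)
      (by
        intro i hi
        simp only [List.length_map, List.length_reverse] at hi
        rw [hP3 i hi, hR2botlen (field.length + i) (by omega) (by omega)]
        simp only [Nat.zero_add, List.length_reverse]
        have := hb2 i hi
        omega)
  set R3 := gridFold (field.reverse.map List.reverse) R2 field.length 0 with hR3def
  have hR3len : R3.length = field.length * 2 := by rw [hL3, hR2len]
  have hR3top : ∀ k, k < field.length →
      R3.getD k [] = ow (List.replicate ((field.headD []).length * 2) "") (field.getD k []) (field.headD []).length := by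
    intro k hk
    rw [hV3 k, if_neg (by simp only [List.length_map, List.length_reverse]; omega), hR2top k hk]
  have hR3bot : ∀ k, field.length ≤ k → k < field.length * 2 →
      R3.getD k [] = ow (ow (List.replicate ((field.headD []).length * 2) "")
          (field.reverse.getD (k - field.length) []) (field.reverse.headD []).length)
        (field.reverse.getD (k - field.length) []).reverse 0 := by
    intro k h1 h2
    rw [hV3 k, if_pos ⟨h1, by simp only [List.length_map, List.length_reverse]; omega⟩,
        hP3 (k - field.length) (by omega), hR2bot k h1 h2]
  -- fourth fill: top-left quadrant
  have hP4 : ∀ i, i < field.length →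
      (field.map List.reverse).getD i [] = (field.getD i []).reverse := by
    intro i hi
    rw [List.getD_eq_getElem _ _ (by simpa using hi), List.getD_eq_getElem _ _ hi]
    simp
  obtain ⟨hL4, hV4⟩ := gridFold_spec (field.map List.reverse) R3 0 0
      (by rw [hR3len]; simp; omega)
      (by
        intro i hi
        simp only [List.length_map] at hi
        simp only [Nat.zero_add]
        rw [hP4 i hi, hR3top i hi,
            ow_length _ _ _ (by rw [List.length_replicate]; have := hb1 i hi; omega)]
        simp only [List.length_reverse, List.length_replicate]
        have := hb1 i hi
        omega)
  set R4 := gridFold (field.map List.reverse) R3 0 0 with hR4def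
  have hR4len : R4.length = field.length * 2 := by rw [hL4, hR3len]
  refine ⟨hR4len, ?_, ?_⟩
  · intro k hk
    rw [hV4 k, if_pos ⟨Nat.zero_le _, by simp only [Nat.zero_add, List.length_map]; omega⟩,
        Nat.sub_zero, hP4 k hk, hR3top k hk, ow_rowPair]
  · intro k h1 h2
    rw [hV4 k, if_neg (by simp only [Nat.zero_add, List.length_map]; omega), hR3bot k h1 h2,
        ow_rowPair]

-- B's helper, row by row: pvHalf is exactly rowPair at the block's leading width
lemma pvHalf_eq (w : Nat) (rows : List (List String)) :
    pvHalf (2 * w) rows = rows.map (fun row => rowPair w row (rows.headD []).length) := by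
  rfl

-- ===== VERDICT (by name: the statement is the Claim_ definition above) =====
theorem draw_diamond_spec : Claim_equal_draw_diamond := by
  intro field _ hpre
  obtain ⟨hlen, htop, hbot⟩ := A_rows field hpre
  show draw_diamond field = draw_diamond_alt field
  have halt : draw_diamond_alt field
      = field.map (fun row => rowPair (field.headD []).length row (field.headD []).length)
        ++ field.reverse.map (fun row => rowPair (field.headD []).length row (field.reverse.headD []).length) := by
    show pvHalf (2 * (field.headD []).length) field
        ++ pvHalf (2 * (field.headD []).length) field.reverse = _
    rw [pvHalf_eq, pvHalf_eq]
  rw [halt]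
  apply List.ext_getElem (by simp [hlen]; omega)
  intro k hk1 hk2
  have hk : k < field.length * 2 := by rw [hlen] at hk1; exact hk1
  rw [← List.getD_eq_getElem (draw_diamond field) [] hk1]
  by_cases hkn : k < field.length
  · rw [htop k hkn]
    rw [List.getElem_append_left (by simpa using hkn), List.getElem_map]
    rw [List.getD_eq_getElem field [] hkn]
  · rw [hbot k (by omega) hk]
    have hkr : k - field.length < field.reverse.length := by simp; omega
    rw [List.getElem_append_right (by simp; omega), List.getElem_map]
    simp only [List.length_map]
    rw [List.getD_eq_getElem field.reverse [] hkr]
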